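-- pv_equiv track=rewrite | github.com/atkinsonsoftware/python-anagram-checker | first_non_repeated_char.py | findKthNonRepeatedChar
-- ===== SOURCE A (Python) =====
-- def findKthNonRepeatedChar(word, k):
--     word = word.lower()
--     counter = 0
--     for i in word:
--         if (word.count(i) == 1):
--             counter += 1
--             if (counter == k):
--                 return i
--     else:
--         return None
-- ===== SOURCE B (Python) =====
-- def findKthNonRepeatedChar(word, k):
--     rest = list(word.lower())
--     while rest:
--         c = rest[0]
--         tail = [x for x in rest[1:] if x != c]
--         if len(tail) == len(rest) - 1:
--             if k == 1:
--                 return c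
--             k -= 1
--         rest = tail
--     return None
-- ===== Notes on version B (the rewrite author's own statement) =====
-- stated objective: faster
-- what changed: Replaces the counter-scan that recounts the full word per character with a strip-and-recurse elimination: each step removes every occurrence of the first remaining character from the shrinking list, decrementing k when that character was unique, so no character is ever examined after its first occurrence is processed.
import Mathlib
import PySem

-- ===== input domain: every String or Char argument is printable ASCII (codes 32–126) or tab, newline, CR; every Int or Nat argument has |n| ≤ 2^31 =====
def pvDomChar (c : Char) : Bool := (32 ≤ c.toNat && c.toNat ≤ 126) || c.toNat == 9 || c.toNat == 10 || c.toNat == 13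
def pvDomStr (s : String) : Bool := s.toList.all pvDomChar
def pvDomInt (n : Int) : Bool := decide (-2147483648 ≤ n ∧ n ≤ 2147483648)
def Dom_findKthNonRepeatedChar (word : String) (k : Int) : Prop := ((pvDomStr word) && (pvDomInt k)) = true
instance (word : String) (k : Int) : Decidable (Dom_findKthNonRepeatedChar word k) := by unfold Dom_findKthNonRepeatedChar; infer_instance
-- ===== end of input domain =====

-- B replaces A's recount-the-whole-word-per-character counter scan by strip-and-recurse
-- elimination over a shrinking list (a different decomposition of the same task).

-- ===== PORT A =====
-- A's scan: for i in word, if word.count(i) == 1 bump the counter and return i when it hits k.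
-- `word.count(i)` counts a ONE-character substring, which is exactly the character count `List.count`.
def findKthA_go (full : List Char) (k : Int) : Int → List Char → Option String
  | _, [] => none
  | counter, c :: rest =>
    if full.count c == 1 then
      if counter + 1 == k then some (String.ofList [c])
      else findKthA_go full k (counter + 1) rest
    else findKthA_go full k counter rest

def findKthNonRepeatedChar (word : String) (k : Int) : Option String :=
  let w := (PySem.Str.lower word).toList
  findKthA_go w k 0 w

-- ===== PORT B =====
-- B's loop: while rest nonempty, drop every occurrence of the head char from the remainder;
-- if none was dropped the head was unique (return it when k == 1, else decrement k).
def findKthB_go : List Char → Int → Option String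
  | [], _ => none
  | c :: rest, k =>
    let tail := rest.filter (fun x => x != c)
    if tail.length == rest.length then
      if k == 1 then some (String.ofList [c])
      else findKthB_go tail (k - 1)
    else findKthB_go tail k
termination_by l => l.length
decreasing_by all_goals simp; exact List.length_filter_le _ _

def findKthNonRepeatedChar_alt (word : String) (k : Int) : Option String :=
  findKthB_go (PySem.Str.lower word).toList k

-- ===== PRECONDITION & SPEC =====
def Spec_findKthNonRepeatedChar (word : String) (k : Int) (out : Option String) : Prop := out = findKthNonRepeatedChar_alt word k
instance (word : String) (k : Int) (out : Option String) : Decidable (Spec_findKthNonRepeatedChar word k out) := by unfold Spec_findKthNonRepeatedChar; infer_instance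

-- ===== CLAIM (what is proved, stated in full; the proofs are below) =====
def Claim_equal_findKthNonRepeatedChar : Prop := ∀ (word : String) (k : Int), Dom_findKthNonRepeatedChar word k → Spec_findKthNonRepeatedChar word k (findKthNonRepeatedChar word k)

-- ===== LEMMAS AND PROOFS =====

-- "k-th element (1-based) of s, as a 1-char string, none if k out of range" — common value of both sides.
def kthSingle (s : List Char) (j : Int) : Option String :=
  if 0 < j ∧ j ≤ (s.length : Int) then (s[(j - 1).toNat]?).map (fun c => String.ofList [c]) else none

theorem kthSingle_nil (j : Int) : kthSingle [] j = none := by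
  simp only [kthSingle, List.length_nil]
  split
  · omega
  · rfl

theorem kthSingle_cons_one (c : Char) (s : List Char) : kthSingle (c :: s) 1 = some (String.ofList [c]) := by
  simp [kthSingle]

theorem kthSingle_cons_ne_one (c : Char) (s : List Char) (j : Int) (h : j ≠ 1) :
    kthSingle (c :: s) j = kthSingle s (j - 1) := by
  unfold kthSingle
  by_cases hg : 0 < j ∧ j ≤ ((c :: s).length : Int)
  · have hg' : 0 < j - 1 ∧ j - 1 ≤ (s.length : Int) := by
      simp only [List.length_cons] at hg; push_cast at hg ⊢; omega
    rw [if_pos hg, if_pos hg']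
    have h2 : (j - 1).toNat = (j - 1 - 1).toNat + 1 := by omega
    rw [h2, List.getElem?_cons_succ]
  · have hg' : ¬ (0 < j - 1 ∧ j - 1 ≤ (s.length : Int)) := by
      simp only [List.length_cons] at hg; push_cast at hg ⊢; omega
    rw [if_neg hg, if_neg hg']

theorem findKthA_go_eq (full : List Char) (k : Int) (l : List Char) :
    ∀ counter : Int, findKthA_go full k counter l =
      kthSingle (l.filter (fun c => full.count c == 1)) (k - counter) := by
  induction l with
  | nil => intro counter; simp [findKthA_go, kthSingle_nil]
  | cons c rest ih =>
    intro counter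
    by_cases hp : (full.count c == 1) = true
    · rw [List.filter_cons, if_pos hp]
      unfold findKthA_go
      rw [if_pos hp]
      by_cases hk : counter + 1 = k
      · have : (counter + 1 == k) = true := by simp [hk]
        rw [if_pos this]
        have : k - counter = 1 := by omega
        rw [this, kthSingle_cons_one]
      · have : (counter + 1 == k) = false := by simp [hk]
        rw [if_neg (by simp [this])]
        rw [ih (counter + 1), kthSingle_cons_ne_one _ _ _ (by omega)]
        congr 1
        omega
    · rw [List.filter_cons, if_neg hp]
      unfold findKthA_go
      rw [if_neg hp, ih counter]

-- B's invariant: on any remaining list l, the loop returns the k-th character of l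
-- whose count IN l is 1 (each processed char carries all its occurrences in l).
theorem findKthB_go_eq (n : ℕ) : ∀ (l : List Char), l.length ≤ n → ∀ k : Int,
    findKthB_go l k = kthSingle (l.filter (fun c => l.count c == 1)) k := by
  induction n with
  | zero =>
    intro l hl k
    have : l = [] := List.eq_nil_of_length_eq_zero (Nat.le_zero.mp hl)
    subst this
    simp [findKthB_go, kthSingle_nil]
  | succ n ih =>
    intro l hl k
    cases l with
    | nil => simp [findKthB_go, kthSingle_nil]
    | cons c rest =>
      have hlen : (rest.filter (fun x => x != c)).length ≤ n := by
        have := List.length_filter_le (fun x => x != c) rest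
        simp only [List.length_cons] at hl
        omega
      unfold findKthB_go
      by_cases hmem : c ∈ rest
      · -- some occurrence removed: filter is strictly shorter
        have hlt : (rest.filter (fun x => x != c)).length < rest.length := by
          have hsub : (rest.filter (fun x => x != c)).Sublist rest := List.filter_sublist
          refine lt_of_le_of_ne hsub.length_le (fun h => ?_)
          have heq := hsub.eq_of_length h
          have := List.filter_eq_self.mp heq c hmem
          simp at this
        rw [if_neg (by simp only [beq_iff_eq]; omega)]
        rw [ih _ hlen k]
        congr 1
        -- filter of c::rest drops c (count ≥ 2), and on rest agrees with tail's filter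
        have hc2 : ((c :: rest).count c == 1) = false := by
          have h1 : 1 ≤ rest.count c := List.one_le_count_iff.mpr hmem
          simp only [List.count_cons_self, beq_eq_false_iff_ne, ne_eq]
          omega
        rw [List.filter_cons, if_neg (by rw [hc2]; exact Bool.false_ne_true)]
        rw [List.filter_filter]
        apply List.filter_congr
        intro d hd
        by_cases hdc : d = c
        · subst hdc
          rw [hc2]
          simp
        · have hne : (d != c) = true := by simp [hdc]
          have hcnt : (rest.filter (fun x => x != c)).count d = rest.count d := by
            simp [List.count_filter, hne]
          rw [hcnt, hne, List.count_cons]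
          rw [if_neg (fun h => hdc (beq_iff_eq.mp h).symm)]
          simp
      · -- c unique: filter removes nothing
        have htail : rest.filter (fun x => x != c) = rest := by
          apply List.filter_eq_self.mpr
          intro a ha
          simp
          intro h; exact hmem (h ▸ ha)
        rw [htail, if_pos (by simp)]
        have hc0 : rest.count c = 0 := List.count_eq_zero.mpr hmem
        have hc1 : ((c :: rest).count c == 1) = true := by
          simp [List.count_cons_self, hc0]
        have hfc : (c :: rest).filter (fun d => (c :: rest).count d == 1)
            = c :: rest.filter (fun d => rest.count d == 1) := by
          rw [List.filter_cons, if_pos hc1]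
          congr 1
          apply List.filter_congr
          intro d hd
          have hdc : d ≠ c := fun h => hmem (h ▸ hd)
          rw [List.count_cons]
          rw [if_neg (fun h => hdc (beq_iff_eq.mp h).symm)]
          simp
        rw [hfc]
        by_cases hk : k = 1
        · subst hk
          rw [if_pos (by simp), kthSingle_cons_one]
        · rw [if_neg (by simpa using hk)]
          rw [ih rest (by simpa using hl) (k - 1), kthSingle_cons_ne_one _ _ _ hk]

-- ===== VERDICT (by name: the statement is the Claim_ definition above) =====
theorem findKthNonRepeatedChar_spec : Claim_equal_findKthNonRepeatedChar := by
  intro word k _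
  unfold Spec_findKthNonRepeatedChar findKthNonRepeatedChar findKthNonRepeatedChar_alt
  rw [findKthA_go_eq, findKthB_go_eq (PySem.Str.lower word).toList.length _ (Nat.le_refl _)]
  norm_num
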